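-- pv_equiv track=rewrite | github.com/NicolasCamachoP/AlgorithmsAnalysisExercises | ProgramaciónDinámica/ReducingDishes.py | LTC_Bottom
-- ===== SOURCE A (Python) =====
-- def LTC_Bottom(SOriginal):
--     M = [[0 for j in range(len(SOriginal) + 1)] for i in range(len(SOriginal) + 1)]
--     S = SOriginal
--     S.sort()
--     for i in range(len(S) - 1, -1, -1):
--         for j in range(1, len(S) + 1):
--             inSol = (j)*S[i] + M[i + 1][j]
--             outSol = M[i + 1][j - 1]
--             M[i][j - 1] = max(inSol, outSol)
--         #End for
--     #End for
--     return M[0][0]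
-- ===== SOURCE B (Python) =====
-- def LTC_Bottom(SOriginal):
--     acc = total = best = 0
--     for x in reversed(sorted(SOriginal)):
--         acc += x
--         total += acc
--         if total > best:
--             best = total
--     return best
-- ===== Notes on version B (the rewrite author's own statement) =====
-- stated objective: faster
-- what changed: Replaces the O(n^2) dishes-vs-multiplier DP table with a sort followed by a single prefix-sum scan over the dishes in decreasing order, keeping the running suffix total and the best coefficient seen.
import Mathlib
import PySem

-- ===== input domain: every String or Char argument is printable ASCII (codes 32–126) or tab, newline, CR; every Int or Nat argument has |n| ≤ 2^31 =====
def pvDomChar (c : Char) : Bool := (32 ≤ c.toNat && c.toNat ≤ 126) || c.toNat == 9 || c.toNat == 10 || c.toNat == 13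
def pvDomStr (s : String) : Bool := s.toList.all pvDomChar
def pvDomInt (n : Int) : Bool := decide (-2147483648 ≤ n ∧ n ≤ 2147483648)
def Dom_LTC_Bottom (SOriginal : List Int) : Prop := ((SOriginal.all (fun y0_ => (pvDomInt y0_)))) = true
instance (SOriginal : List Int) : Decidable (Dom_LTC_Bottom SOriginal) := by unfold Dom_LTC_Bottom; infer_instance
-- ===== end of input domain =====

-- B replaces A's O(n^2) DP table with a sort plus one prefix-sum scan (O(n log n)); equivalence is about
-- the RETURN value only: Python A sorts its argument in place, B does not mutate it.

-- ===== PORT A =====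
def LTC_A_inner (S : List Int) (i : Int) (M : List (List Int)) (j : Int) : List (List Int) :=
  let inSol := j * PySem.List.pyGetD S i 0 + PySem.List.pyGetD (PySem.List.pyGetD M (i + 1) []) j 0
  let outSol := PySem.List.pyGetD (PySem.List.pyGetD M (i + 1) []) (j - 1) 0
  PySem.List.pySetD M i (PySem.List.pySetD (PySem.List.pyGetD M i []) (j - 1) (max inSol outSol))

def LTC_A_outer (S : List Int) (M : List (List Int)) (i : Int) : List (List Int) :=
  (PySem.List.pyRange 1 ((S.length : Int) + 1) 1).foldl (LTC_A_inner S i) M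

def LTC_Bottom (SOriginal : List Int) : Int :=
  let M : List (List Int) :=
    (PySem.List.pyRange 0 ((SOriginal.length : Int) + 1) 1).map (fun _ =>
      (PySem.List.pyRange 0 ((SOriginal.length : Int) + 1) 1).map (fun _ => (0 : Int)))
  let S := PySem.List.sorted SOriginal (fun x => x) false
  let M := (PySem.List.pyRange ((S.length : Int) - 1) (-1) (-1)).foldl (LTC_A_outer S) M
  PySem.List.pyGetD (PySem.List.pyGetD M 0 []) 0 0

-- ===== PORT B =====
def LTC_B_step (st : Int × Int × Int) (x : Int) : Int × Int × Int :=
  let acc := st.1 + x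
  let total := st.2.1 + acc
  let best := if total > st.2.2 then total else st.2.2
  (acc, total, best)

def LTC_Bottom_alt (SOriginal : List Int) : Int :=
  let R := (PySem.List.sorted SOriginal (fun x => x) false).reverse
  (R.foldl LTC_B_step (0, 0, 0)).2.2

-- ===== PRECONDITION & SPEC =====
def Spec_LTC_Bottom (SOriginal : List Int) (out : Int) : Prop := out = LTC_Bottom_alt SOriginal
instance (SOriginal : List Int) (out : Int) : Decidable (Spec_LTC_Bottom SOriginal out) := by unfold Spec_LTC_Bottom; infer_instance

-- ===== CLAIM (what is proved, stated in full; the proofs are below) =====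
def Claim_equal_LTC_Bottom : Prop := ∀ (SOriginal : List Int), Dom_LTC_Bottom SOriginal → Spec_LTC_Bottom SOriginal (LTC_Bottom SOriginal)

-- ===== LEMMAS AND PROOFS =====

-- pvW R k m : the like-time value of taking the m largest dishes (prefix of the descending list R)
-- when k later multipliers are already reserved: sum_{j<m} (k+m-j)*R[j].
def pvW (R : List Int) : ℕ → ℕ → Int
  | _, 0 => 0
  | k, m + 1 => ((k : Int) + 1) * R.getD m 0 + pvW R (k + 1) m

def pvPsum (R : List Int) : ℕ → Int
  | 0 => 0
  | t + 1 => pvPsum R t + R.getD t 0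

-- max over m ≤ t of pvW R k m
def pvWmaxK (R : List Int) (k : ℕ) : ℕ → Int
  | 0 => 0
  | t + 1 => max (pvWmaxK R k t) (pvW R k (t + 1))

-- the DP recursion of A's table, on the descending list R (row with p dishes available)
def pvG (R : List Int) (n : ℕ) : ℕ → ℕ → Int
  | 0, _ => 0
  | p + 1, k => if n ≤ k then 0 else
      max (((k : Int) + 1) * R.getD p 0 + pvG R n p (k + 1)) (pvG R n p k)

-- ideal table rows
def pvRow (R : List Int) (n p : ℕ) : List Int := (List.range (n + 1)).map (fun k => pvG R n p k)
def pvRowP (R : List Int) (n p t : ℕ) : List Int :=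
  (List.range (n + 1)).map (fun k => if k < t then pvG R n p k else 0)
def pvTblP (R : List Int) (n i t : ℕ) : List (List Int) :=
  (List.range (n + 1)).map (fun r =>
    if r < i then (List.range (n + 1)).map (fun _ => (0 : Int))
    else if r = i then pvRowP R n (n - i) t
    else pvRow R n (n - r))
def pvTbl (R : List Int) (n i : ℕ) : List (List Int) :=
  (List.range (n + 1)).map (fun r =>
    if r < i then (List.range (n + 1)).map (fun _ => (0 : Int)) else pvRow R n (n - r))

theorem pvW_succ (R : List Int) (k m : ℕ) :
    pvW R k (m + 1) = pvW R k m + pvPsum R (m + 1) + (k : Int) * R.getD m 0 := by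
  induction m generalizing k with
  | zero => simp [pvW, pvPsum]; ring
  | succ m ih =>
      rw [show m + 1 + 1 = (m+1) + 1 from rfl, pvW, ih (k+1), pvW]
      simp [pvPsum]
      ring

theorem pvWmaxK_ub (R : List Int) (k t m : ℕ) (hm : m ≤ t) : pvW R k m ≤ pvWmaxK R k t := by
  induction t with
  | zero => interval_cases m; simp [pvW, pvWmaxK]
  | succ t ih =>
      rcases Nat.lt_or_ge m (t+1) with h | h
      · exact le_trans (ih (by omega)) (by rw [pvWmaxK]; exact le_max_left _ _)
      · have : m = t + 1 := by omega
        subst this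
        rw [pvWmaxK]; exact le_max_right _ _

theorem pvWmaxK_ex (R : List Int) (k t : ℕ) : ∃ m ≤ t, pvWmaxK R k t = pvW R k m := by
  induction t with
  | zero => exact ⟨0, le_refl _, by simp [pvW, pvWmaxK]⟩
  | succ t ih =>
      rcases ih with ⟨m, hm, hv⟩
      rw [pvWmaxK]
      rcases le_total (pvWmaxK R k t) (pvW R k (t+1)) with h | h
      · exact ⟨t+1, le_refl _, by rw [max_eq_right h]⟩
      · exact ⟨m, by omega, by rw [max_eq_left h, hv]⟩

-- lower bound: every pvW R k m (m ≤ p) is ≤ the DP value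
theorem pvG_ub (R : List Int) (p k m : ℕ) (hkp : k + p ≤ R.length) (hm : m ≤ p) :
    pvW R k m ≤ pvG R R.length p k := by
  induction p generalizing k m with
  | zero => interval_cases m; simp [pvW, pvG]
  | succ p ih =>
      rw [pvG, if_neg (by omega)]
      rcases Nat.lt_or_ge m (p+1) with h | h
      · exact le_trans (ih k m (by omega) (by omega)) (le_max_right _ _)
      · have : m = p + 1 := by omega
        subst this
        refine le_trans ?_ (le_max_left _ _)
        rw [pvW]
        have := ih (k+1) p (by omega) (le_refl _)
        omega

-- upper bound: the DP value is ≤ the max of the pvW R k m, m ≤ p (needs R descending)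
theorem pvG_le (R : List Int)
    (hdesc : ∀ j p, j ≤ p → p < R.length → R.getD p 0 ≤ R.getD j 0)
    (p k : ℕ) (hkp : k + p ≤ R.length) :
    pvG R R.length p k ≤ pvWmaxK R k p := by
  induction p generalizing k with
  | zero => simp [pvG, pvWmaxK]
  | succ p ih =>
      rw [pvG, if_neg (by omega)]
      apply max_le
      · rcases pvWmaxK_ex R (k+1) p with ⟨m, hm, hv⟩
        have h1 : pvG R R.length p (k+1) ≤ pvW R (k+1) m := by
          rw [← hv]; exact ih (k+1) (by omega)
        have h2 : ((k:Int)+1) * R.getD p 0 + pvW R (k+1) m ≤ pvW R k (m+1) := by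
          rw [pvW]
          have hle : R.getD p 0 ≤ R.getD m 0 := hdesc m p (by omega) (by omega)
          have : ((k:Int)+1) * R.getD p 0 ≤ ((k:Int)+1) * R.getD m 0 :=
            mul_le_mul_of_nonneg_left hle (by positivity)
          omega
        calc ((k:Int)+1) * R.getD p 0 + pvG R R.length p (k+1)
            ≤ ((k:Int)+1) * R.getD p 0 + pvW R (k+1) m := by omega
          _ ≤ pvW R k (m+1) := h2
          _ ≤ pvWmaxK R k (p+1) := pvWmaxK_ub R k (p+1) (m+1) (by omega)
      · exact le_trans (ih k (by omega)) (by rw [pvWmaxK]; exact le_max_left _ _)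

theorem pvG_eq_wmax (R : List Int)
    (hdesc : ∀ j p, j ≤ p → p < R.length → R.getD p 0 ≤ R.getD j 0) :
    pvG R R.length R.length 0 = pvWmaxK R 0 R.length := by
  apply le_antisymm
  · exact pvG_le R hdesc R.length 0 (by omega)
  · rcases pvWmaxK_ex R 0 R.length with ⟨m, hm, hv⟩
    rw [hv]
    exact pvG_ub R R.length 0 m (by omega) hm

-- ===== B side: the scan computes pvWmaxK R 0 n =====
theorem pvB_scan (R : List Int) (t : ℕ) (ht : t ≤ R.length) :
    ((R.drop t).foldl LTC_B_step (pvPsum R t, pvW R 0 t, pvWmaxK R 0 t)).2.2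
      = pvWmaxK R 0 R.length := by
  induction hfuel : R.length - t generalizing t with
  | zero =>
      have h : t = R.length := by omega
      subst h
      simp [List.drop_length]
  | succ f ih =>
      have htl : t < R.length := by omega
      rw [List.drop_eq_getElem_cons htl, List.foldl_cons]
      have hget : R.getD t 0 = R[t] := List.getD_eq_getElem R 0 htl
      have hstep : LTC_B_step (pvPsum R t, pvW R 0 t, pvWmaxK R 0 t) R[t]
          = (pvPsum R (t + 1), pvW R 0 (t + 1), pvWmaxK R 0 (t + 1)) := by
        have hacc : pvPsum R t + R[t] = pvPsum R (t + 1) := by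
          rw [pvPsum, hget]
        have htot : pvW R 0 t + (pvPsum R t + R[t]) = pvW R 0 (t + 1) := by
          rw [pvW_succ]
          have : pvPsum R (t + 1) = pvPsum R t + R[t] := by rw [pvPsum, hget]
          omega
        have hbest : (if pvW R 0 t + (pvPsum R t + R[t]) > pvWmaxK R 0 t
              then pvW R 0 t + (pvPsum R t + R[t]) else pvWmaxK R 0 t)
            = pvWmaxK R 0 (t + 1) := by
          rw [htot, pvWmaxK]
          by_cases h : pvW R 0 (t + 1) > pvWmaxK R 0 t
          · rw [if_pos h, max_eq_right (le_of_lt h)]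
          · rw [if_neg h, max_eq_left (by omega)]
        simp only [LTC_B_step]
        rw [hacc, htot] at *
        exact Prod.ext rfl (Prod.ext rfl hbest)
      rw [hstep]
      exact ih (t + 1) (by omega) (by omega)

theorem pvB_eq (R : List Int) :
    (R.foldl LTC_B_step (0, 0, 0)).2.2 = pvWmaxK R 0 R.length := by
  have := pvB_scan R 0 (by omega)
  simpa [pvPsum, pvW, pvWmaxK] using this

-- ===== A side: the table computes pvG =====
theorem pv_getD_map_range {α : Type} (f : ℕ → α) (m r : ℕ) (d : α) :
    ((List.range m).map f).getD r d = if r < m then f r else d := by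
  rcases Nat.lt_or_ge r m with h | h
  · rw [List.getD_eq_getElem _ _ (by simpa using h)]
    simp [h]
  · rw [List.getD_eq_default _ _ (by simpa using h)]
    simp [Nat.not_lt.mpr h]

theorem pv_set_map_range {α : Type} (f : ℕ → α) (m t : ℕ) (v : α) :
    ((List.range m).map f).set t v
      = (List.range m).map (fun r => if r = t then v else f r) := by
  apply List.ext_getElem
  · simp
  · intro i h1 h2
    simp only [List.getElem_set, List.getElem_map, List.getElem_range]
    by_cases h : i = t
    · subst h; simp
    · simp [h, Ne.symm h]

theorem pvG_of_le (R : List Int) (n p k : ℕ) (h : n ≤ k) : pvG R n p k = 0 := by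
  cases p <;> simp [pvG, h]

theorem pv_inner_step (R S : List Int) (n i t : ℕ) (hS : S = R.reverse) (hn : n = R.length)
    (hi : i < n) (ht : t < n) :
    LTC_A_inner S (i : Int) (pvTblP R n i t) ((t : Int) + 1) = pvTblP R n i (t + 1) := by
  have hm : n - i = (n - (i + 1)) + 1 := by omega
  simp only [LTC_A_inner]
  have c3 : ((t : Int) + 1 - 1) = ((t : ℕ) : Int) := by ring
  have c2 : ((t : Int) + 1) = ((t + 1 : ℕ) : Int) := by push_cast; ring
  have c1 : ((i : Int) + 1) = ((i + 1 : ℕ) : Int) := by push_cast; ring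
  rw [c3, c2, c1]
  simp only [PySem.List.pyGetD_natCast, PySem.List.pySetD_natCast]
  have hMi1 : (pvTblP R n i t).getD (i + 1) [] = pvRow R n (n - (i + 1)) := by
    unfold pvTblP
    rw [pv_getD_map_range, if_pos (by omega : i + 1 < n + 1), if_neg (by omega), if_neg (by omega)]
  have hrow1 : (pvRow R n (n - (i + 1))).getD (t + 1) 0 = pvG R n (n - (i + 1)) (t + 1) := by
    unfold pvRow; rw [pv_getD_map_range, if_pos (by omega : t + 1 < n + 1)]
  have hrow0 : (pvRow R n (n - (i + 1))).getD t 0 = pvG R n (n - (i + 1)) t := by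
    unfold pvRow; rw [pv_getD_map_range, if_pos (by omega : t < n + 1)]
  have hMi : (pvTblP R n i t).getD i [] = pvRowP R n (n - i) t := by
    unfold pvTblP
    rw [pv_getD_map_range, if_pos (by omega : i < n + 1), if_neg (by omega), if_pos rfl]
  have hSg : S.getD i 0 = R.getD (n - (i + 1)) 0 := by
    subst hS
    have hi' : i < R.reverse.length := by rw [List.length_reverse]; omega
    rw [List.getD_eq_getElem _ 0 hi', List.getElem_reverse,
        List.getD_eq_getElem _ 0 (by omega : n - (i + 1) < R.length)]
    congr 1
    omega
  rw [hMi1, hrow1, hrow0, hMi, hSg]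
  have hval' : max (((t + 1 : ℕ) : Int) * R.getD (n - (i + 1)) 0 + pvG R n (n - (i + 1)) (t + 1))
        (pvG R n (n - (i + 1)) t) = pvG R n (n - i) t := by
    rw [hm, pvG, if_neg (by omega : ¬ n ≤ t)]
    push_cast
    ring_nf
  rw [hval']
  have hsetrow : (pvRowP R n (n - i) t).set t (pvG R n (n - i) t) = pvRowP R n (n - i) (t + 1) := by
    unfold pvRowP
    rw [pv_set_map_range]
    apply List.map_congr_left
    intro k _
    by_cases hk : k = t
    · subst hk; rw [if_pos rfl, if_pos (by omega)]
    · rw [if_neg hk]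
      by_cases hk2 : k < t
      · rw [if_pos hk2, if_pos (by omega)]
      · rw [if_neg hk2, if_neg (by omega)]
  rw [hsetrow]
  unfold pvTblP
  rw [pv_set_map_range]
  apply List.map_congr_left
  intro r _
  by_cases hr : r = i
  · subst hr; rw [if_pos rfl, if_neg (by omega), if_pos rfl]
  · rw [if_neg hr]
    by_cases h2 : r < i
    · rw [if_pos h2, if_pos h2]
    · rw [if_neg h2, if_neg h2, if_neg hr, if_neg hr]

theorem pv_inner_loop (R S : List Int) (n i : ℕ) (hS : S = R.reverse) (hn : n = R.length)
    (hi : i < n) (t : ℕ) (ht : t ≤ n) :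
    (PySem.List.pyRange ((t : Int) + 1) ((n : Int) + 1) 1).foldl (LTC_A_inner S (i : Int))
      (pvTblP R n i t) = pvTblP R n i n := by
  induction hfuel : n - t generalizing t with
  | zero =>
      have h : t = n := by omega
      subst h
      rw [PySem.List.pyRange_one_eq_nil (le_refl _)]
      rfl
  | succ f ihl =>
      have htn : t < n := by omega
      rw [PySem.List.pyRange_one_cons (by omega : (t : Int) + 1 < (n : Int) + 1), List.foldl_cons,
          pv_inner_step R S n i t hS hn hi htn]
      have c : ((t : Int) + 1 + 1) = ((t + 1 : ℕ) : Int) + 1 := by push_cast; ring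
      rw [c]
      exact ihl (t + 1) (by omega) (by omega)

theorem pv_tblP_zero (R : List Int) (n i : ℕ) (_hi : i < n) :
    pvTblP R n i 0 = pvTbl R n (i + 1) := by
  unfold pvTblP pvTbl
  apply List.map_congr_left
  intro r hr
  by_cases h1 : r < i
  · rw [if_pos h1, if_pos (by omega)]
  · rw [if_neg h1]
    by_cases h2 : r = i
    · rw [if_pos h2, if_pos (by omega)]
      unfold pvRowP
      apply List.map_congr_left
      intro k _
      rw [if_neg (by omega)]
    · rw [if_neg h2, if_neg (by omega)]

theorem pv_tblP_full (R : List Int) (n i : ℕ) (hi : i ≤ n) :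
    pvTblP R n i n = pvTbl R n i := by
  unfold pvTblP pvTbl
  apply List.map_congr_left
  intro r hr
  by_cases h1 : r < i
  · rw [if_pos h1, if_pos h1]
  · rw [if_neg h1, if_neg h1]
    by_cases h2 : r = i
    · rw [if_pos h2]
      unfold pvRowP pvRow
      apply List.map_congr_left
      intro k hk
      subst h2
      by_cases h3 : k < n
      · rw [if_pos h3]
      · rw [if_neg h3, pvG_of_le _ _ _ _ (by omega)]
    · rw [if_neg h2]

theorem pv_outer_loop (R S : List Int) (n : ℕ) (hS : S = R.reverse) (hn : n = R.length)
    (i : ℕ) (hi : i ≤ n) :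
    (PySem.List.pyRange ((i : Int) - 1) (-1) (-1)).foldl (LTC_A_outer S)
      (pvTbl R n i) = pvTbl R n 0 := by
  induction i with
  | zero =>
      rw [show ((0 : ℕ) : Int) - 1 = -1 by norm_num, PySem.List.pyRange_neg_one_eq_nil (le_refl _)]
      rfl
  | succ i ihl =>
      have hin : i < n := by omega
      have c : ((i + 1 : ℕ) : Int) - 1 = (i : Int) := by push_cast; ring
      rw [c, PySem.List.pyRange_neg_one_cons (by omega : (-1 : Int) < (i : Int)), List.foldl_cons]
      have hSl : (S.length : Int) = (n : Int) := by
        rw [hS, List.length_reverse, ← hn]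
      have houter : LTC_A_outer S (pvTbl R n (i + 1)) (i : Int) = pvTbl R n i := by
        unfold LTC_A_outer
        have hil := pv_inner_loop R S n i hS hn hin 0 (by omega)
        rw [show ((0 : ℕ) : Int) + 1 = (1 : Int) by norm_num] at hil
        rw [hSl, ← pv_tblP_zero R n i hin, hil, pv_tblP_full R n i (by omega)]
      rw [houter]
      exact ihl (by omega)

theorem pvA_eq (SOriginal : List Int) :
    LTC_Bottom SOriginal
      = pvG ((PySem.List.sorted SOriginal (fun x => x) false).reverse)
          SOriginal.length SOriginal.length 0 := by
  simp only [LTC_Bottom]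
  set L := PySem.List.sorted SOriginal (fun x => x) false with hL
  set R := L.reverse with hRdef
  set n := SOriginal.length with hn
  have hS : L = R.reverse := (List.reverse_reverse L).symm
  have hnR : n = R.length := by
    rw [hRdef, List.length_reverse, hL, PySem.List.length_sorted]
  have hLn : (L.length : Int) = (n : Int) := by
    rw [hL, PySem.List.length_sorted]
  have hinit : (PySem.List.pyRange 0 ((n : Int) + 1) 1).map (fun _ =>
      (PySem.List.pyRange 0 ((n : Int) + 1) 1).map (fun _ => (0 : Int))) = pvTbl R n n := by
    have hlen : (PySem.List.pyRange 0 ((n : Int) + 1) 1).length = n + 1 := by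
      rw [PySem.List.length_pyRange_one]; omega
    have h1 : pvTbl R n n = (List.range (n + 1)).map (fun _ => List.replicate (n + 1) (0 : Int)) := by
      unfold pvTbl
      apply List.map_congr_left
      intro r hr
      by_cases h : r < n
      · rw [if_pos h, List.map_const', List.length_range]
      · rw [if_neg h]
        have : r = n := by simp at hr; omega
        subst this
        unfold pvRow
        rw [Nat.sub_self]
        have : (List.range (n + 1)).map (fun k => pvG R n 0 k)
            = (List.range (n + 1)).map (fun _ => (0 : Int)) := by
          apply List.map_congr_left; intro k _; rfl
        rw [this, List.map_const', List.length_range]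
    rw [h1, List.map_const', List.map_const', List.map_const', hlen, List.length_range]
  rw [hinit, hLn]
  have houter := pv_outer_loop R L n hS hnR n (le_refl n)
  rw [houter]
  rw [show (0 : Int) = ((0 : ℕ) : Int) by norm_num, PySem.List.pyGetD_natCast,
      PySem.List.pyGetD_natCast]
  unfold pvTbl
  rw [pv_getD_map_range, if_pos (by omega : 0 < n + 1), if_neg (by omega)]
  unfold pvRow
  rw [pv_getD_map_range, if_pos (by omega : 0 < n + 1), Nat.sub_zero]

-- descending order of R
theorem pv_desc (SOriginal : List Int) :
    ∀ j p, j ≤ p → p < ((PySem.List.sorted SOriginal (fun x => x) false).reverse).length →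
      ((PySem.List.sorted SOriginal (fun x => x) false).reverse).getD p 0
        ≤ ((PySem.List.sorted SOriginal (fun x => x) false).reverse).getD j 0 := by
  intro j p hjp hp
  set L := PySem.List.sorted SOriginal (fun x => x) false with hL
  have hlen : L.reverse.length = L.length := List.length_reverse
  have hpL : p < L.reverse.length := hp
  have hjL : j < L.reverse.length := by omega
  rw [List.getD_eq_getElem _ 0 hpL, List.getD_eq_getElem _ 0 hjL,
    List.getElem_reverse, List.getElem_reverse]
  have h1 : (PySem.List.sorted SOriginal (fun x => x) false).length = L.length := by rw [hL]
  exact PySem.List.key_sorted_getElem_mono SOriginal (fun x => x)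
    (p := L.length - 1 - p) (q := L.length - 1 - j) (by omega) (by omega)

-- ===== VERDICT (by name: the statement is the Claim_ definition above) =====
theorem LTC_Bottom_spec : Claim_equal_LTC_Bottom := by
  intro SOriginal _
  unfold Spec_LTC_Bottom LTC_Bottom_alt
  set R := (PySem.List.sorted SOriginal (fun x => x) false).reverse with hR
  have hlen : R.length = SOriginal.length := by
    simp [hR, PySem.List.length_sorted]
  rw [pvB_eq, pvA_eq, ← hR, ← hlen]
  exact pvG_eq_wmax R (pv_desc SOriginal)
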